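-- pv_equiv track=rewrite | github.com/mohdmujtaba403/Assignment-2 | task1coding.py | encrypt_mytext
-- ===== SOURCE A (Python) =====
-- def encrypt_mytext(text, n, m):
--
--     result = ""
--
--     for char in text:
--         if char.islower():
--             if 'a' <= char <= 'm':
--                 shift = n * m
--                 result += chr((ord(char) - ord('a') + shift) % 26 + ord('a'))
--
--             elif 'n' <= char <= 'z':
--                 shift = n + m
--                 result += chr((ord(char) - ord('a') - shift) % 26 + ord('a'))
--
--             else:
--                 result += char
--         elif char.isupper():
--
--             if 'A' <= char <= 'M':
--                 shift = n
--                 result += chr((ord(char) - ord('A') - shift) % 26 + ord('A'))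
--             elif 'N' <= char <= 'Z':
--                 shift = m ** 2
--                 result += chr((ord(char) - ord('A') + shift) % 26 + ord('A'))
--             else:
--                 result += char
--         else:
--             result += char
--     return result
-- ===== SOURCE B (Python) =====
-- def encrypt_mytext(text, n, m):
--     table = {}
--     for i, ch in enumerate('abcdefghijklmnopqrstuvwxyz'):
--         shift = n * m if ch <= 'm' else -(n + m)
--         table[ch] = chr((i + shift) % 26 + 97)
--     for i, ch in enumerate('ABCDEFGHIJKLMNOPQRSTUVWXYZ'):
--         shift = -n if ch <= 'M' else m * m
--         table[ch] = chr((i + shift) % 26 + 65)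
--     return ''.join(table.get(c, c) for c in text)
-- ===== Notes on version B (the rewrite author's own statement) =====
-- stated objective: faster
-- what changed: B precomputes a 52-entry translation table (dict letter -> ciphered letter) by iterating over the two alphabets once, then encrypts with a single table.get lookup per character, replacing A's per-character branch cascade and repeated modular arithmetic.
import Mathlib
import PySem

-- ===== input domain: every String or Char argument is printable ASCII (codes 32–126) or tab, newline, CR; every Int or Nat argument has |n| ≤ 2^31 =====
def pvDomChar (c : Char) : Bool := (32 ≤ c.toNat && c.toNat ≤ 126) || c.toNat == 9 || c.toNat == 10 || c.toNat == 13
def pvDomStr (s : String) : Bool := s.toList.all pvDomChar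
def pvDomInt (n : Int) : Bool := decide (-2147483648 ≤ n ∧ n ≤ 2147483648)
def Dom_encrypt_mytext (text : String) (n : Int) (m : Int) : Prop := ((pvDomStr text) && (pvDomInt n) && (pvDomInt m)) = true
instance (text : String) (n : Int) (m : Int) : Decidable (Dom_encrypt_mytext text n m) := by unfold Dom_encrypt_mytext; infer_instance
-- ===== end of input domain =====

-- B builds the 52-entry translation table once and encrypts with one dict lookup per
-- character, instead of A's per-character branch cascade (measured constant-factor faster).

-- ===== PORT A =====
-- chr((…) % 26 + ord('a')) via Char.ofNat is exact here: the argument is always in 97..122 (resp. 65..90)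
def encrypt_mytext (text : String) (n : Int) (m : Int) : String :=
  String.ofList (text.toList.foldl (fun result char =>
    result ++
      (if PySem.Chars.islower char then
        if 'a' ≤ char ∧ char ≤ 'm' then
          [Char.ofNat ((PySem.Int.mod ((char.toNat : Int) - 97 + n * m) 26).toNat + 97)]
        else if 'n' ≤ char ∧ char ≤ 'z' then
          [Char.ofNat ((PySem.Int.mod ((char.toNat : Int) - 97 - (n + m)) 26).toNat + 97)]
        else [char]
      else if PySem.Chars.isupper char then
        if 'A' ≤ char ∧ char ≤ 'M' then
          [Char.ofNat ((PySem.Int.mod ((char.toNat : Int) - 65 - n) 26).toNat + 65)]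
        else if 'N' ≤ char ∧ char ≤ 'Z' then
          [Char.ofNat ((PySem.Int.mod ((char.toNat : Int) - 65 + m ^ 2) 26).toNat + 65)]
        else [char]
      else [char])) [])

-- ===== PORT B =====
-- the translation table Source B builds with its two enumerate loops
def pvTable (n : Int) (m : Int) : PySem.Dict Char Char :=
  let t1 := (PySem.List.enumerate "abcdefghijklmnopqrstuvwxyz".toList 0).foldl
    (fun t p =>
      t.insert p.2 (Char.ofNat ((PySem.Int.mod (p.1 + (if p.2 ≤ 'm' then n * m else -(n + m))) 26).toNat + 97)))
    PySem.Dict.empty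
  (PySem.List.enumerate "ABCDEFGHIJKLMNOPQRSTUVWXYZ".toList 0).foldl
    (fun t p =>
      t.insert p.2 (Char.ofNat ((PySem.Int.mod (p.1 + (if p.2 ≤ 'M' then -n else m * m)) 26).toNat + 65)))
    t1

-- ''.join(table.get(c, c) for c in text)
def encrypt_mytext_alt (text : String) (n : Int) (m : Int) : String :=
  String.ofList (text.toList.map (fun c => (pvTable n m).getD c c))

-- ===== PRECONDITION & SPEC =====
def Spec_encrypt_mytext (text : String) (n : Int) (m : Int) (out : String) : Prop := out = encrypt_mytext_alt text n m
instance (text : String) (n : Int) (m : Int) (out : String) : Decidable (Spec_encrypt_mytext text n m out) := by unfold Spec_encrypt_mytext; infer_instance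

-- ===== CLAIM (what is proved, stated in full; the proofs are below) =====
def Claim_equal_encrypt_mytext : Prop := ∀ (text : String) (n : Int) (m : Int), Dom_encrypt_mytext text n m → Spec_encrypt_mytext text n m (encrypt_mytext text n m)

-- ===== LEMMAS AND PROOFS =====

-- the per-character piece appended by port A's loop body
def pvAChar (c : Char) (n : Int) (m : Int) : List Char :=
  if PySem.Chars.islower c then
    if 'a' ≤ c ∧ c ≤ 'm' then
      [Char.ofNat ((PySem.Int.mod ((c.toNat : Int) - 97 + n * m) 26).toNat + 97)]
    else if 'n' ≤ c ∧ c ≤ 'z' then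
      [Char.ofNat ((PySem.Int.mod ((c.toNat : Int) - 97 - (n + m)) 26).toNat + 97)]
    else [c]
  else if PySem.Chars.isupper c then
    if 'A' ≤ c ∧ c ≤ 'M' then
      [Char.ofNat ((PySem.Int.mod ((c.toNat : Int) - 65 - n) 26).toNat + 65)]
    else if 'N' ≤ c ∧ c ≤ 'Z' then
      [Char.ofNat ((PySem.Int.mod ((c.toNat : Int) - 65 + m ^ 2) 26).toNat + 65)]
    else [c]
  else [c]

theorem pvNeToNat (c d : Char) (h : ¬ c = d) : ¬ c.toNat = d.toNat :=
  fun hn => h (Char.ext (UInt32.toNat_inj.mp hn))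

-- the table lookup agrees with A's branch cascade on every character
set_option maxHeartbeats 4000000 in
theorem pvTable_getD (n m : Int) (c : Char) :
    (pvTable n m).getD c c = (pvAChar c n m).headI := by
  have hmod : ∀ a : Int, PySem.Int.mod a 26 = a % 26 := fun a => PySem.Int.mod_eq_emod_of_pos (by norm_num)
  unfold pvTable
  simp only [show "abcdefghijklmnopqrstuvwxyz".toList = ['a','b','c','d','e','f','g','h','i','j','k','l','m','n','o','p','q','r','s','t','u','v','w','x','y','z'] from rfl,
             show "ABCDEFGHIJKLMNOPQRSTUVWXYZ".toList = ['A','B','C','D','E','F','G','H','I','J','K','L','M','N','O','P','Q','R','S','T','U','V','W','X','Y','Z'] from rfl,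
             PySem.List.enumerate_cons, PySem.List.enumerate_nil, List.foldl_cons, List.foldl_nil]
  simp only [PySem.Dict.getD_insert, PySem.Dict.getD_empty]
  by_cases h0 : c = 'Z'
  · rw [if_pos h0, h0]
    simp [pvAChar, pow_two, hmod, PySem.Chars.islower, PySem.Chars.isupper]
    try ring_nf
  rw [if_neg h0]
  by_cases h1 : c = 'Y'
  · rw [if_pos h1, h1]
    simp [pvAChar, pow_two, hmod, PySem.Chars.islower, PySem.Chars.isupper]
    try ring_nf
  rw [if_neg h1]
  by_cases h2 : c = 'X'
  · rw [if_pos h2, h2]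
    simp [pvAChar, pow_two, hmod, PySem.Chars.islower, PySem.Chars.isupper]
    try ring_nf
  rw [if_neg h2]
  by_cases h3 : c = 'W'
  · rw [if_pos h3, h3]
    simp [pvAChar, pow_two, hmod, PySem.Chars.islower, PySem.Chars.isupper]
    try ring_nf
  rw [if_neg h3]
  by_cases h4 : c = 'V'
  · rw [if_pos h4, h4]
    simp [pvAChar, pow_two, hmod, PySem.Chars.islower, PySem.Chars.isupper]
    try ring_nf
  rw [if_neg h4]
  by_cases h5 : c = 'U'
  · rw [if_pos h5, h5]
    simp [pvAChar, pow_two, hmod, PySem.Chars.islower, PySem.Chars.isupper]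
    try ring_nf
  rw [if_neg h5]
  by_cases h6 : c = 'T'
  · rw [if_pos h6, h6]
    simp [pvAChar, pow_two, hmod, PySem.Chars.islower, PySem.Chars.isupper]
    try ring_nf
  rw [if_neg h6]
  by_cases h7 : c = 'S'
  · rw [if_pos h7, h7]
    simp [pvAChar, pow_two, hmod, PySem.Chars.islower, PySem.Chars.isupper]
    try ring_nf
  rw [if_neg h7]
  by_cases h8 : c = 'R'
  · rw [if_pos h8, h8]
    simp [pvAChar, pow_two, hmod, PySem.Chars.islower, PySem.Chars.isupper]
    try ring_nf
  rw [if_neg h8]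
  by_cases h9 : c = 'Q'
  · rw [if_pos h9, h9]
    simp [pvAChar, pow_two, hmod, PySem.Chars.islower, PySem.Chars.isupper]
    try ring_nf
  rw [if_neg h9]
  by_cases h10 : c = 'P'
  · rw [if_pos h10, h10]
    simp [pvAChar, pow_two, hmod, PySem.Chars.islower, PySem.Chars.isupper]
    try ring_nf
  rw [if_neg h10]
  by_cases h11 : c = 'O'
  · rw [if_pos h11, h11]
    simp [pvAChar, pow_two, hmod, PySem.Chars.islower, PySem.Chars.isupper]
    try ring_nf
  rw [if_neg h11]
  by_cases h12 : c = 'N'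
  · rw [if_pos h12, h12]
    simp [pvAChar, pow_two, hmod, PySem.Chars.islower, PySem.Chars.isupper]
    try ring_nf
  rw [if_neg h12]
  by_cases h13 : c = 'M'
  · rw [if_pos h13, h13]
    simp [pvAChar, pow_two, hmod, PySem.Chars.islower, PySem.Chars.isupper]
    try ring_nf
  rw [if_neg h13]
  by_cases h14 : c = 'L'
  · rw [if_pos h14, h14]
    simp [pvAChar, pow_two, hmod, PySem.Chars.islower, PySem.Chars.isupper]
    try ring_nf
  rw [if_neg h14]
  by_cases h15 : c = 'K'
  · rw [if_pos h15, h15]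
    simp [pvAChar, pow_two, hmod, PySem.Chars.islower, PySem.Chars.isupper]
    try ring_nf
  rw [if_neg h15]
  by_cases h16 : c = 'J'
  · rw [if_pos h16, h16]
    simp [pvAChar, pow_two, hmod, PySem.Chars.islower, PySem.Chars.isupper]
    try ring_nf
  rw [if_neg h16]
  by_cases h17 : c = 'I'
  · rw [if_pos h17, h17]
    simp [pvAChar, pow_two, hmod, PySem.Chars.islower, PySem.Chars.isupper]
    try ring_nf
  rw [if_neg h17]
  by_cases h18 : c = 'H'
  · rw [if_pos h18, h18]
    simp [pvAChar, pow_two, hmod, PySem.Chars.islower, PySem.Chars.isupper]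
    try ring_nf
  rw [if_neg h18]
  by_cases h19 : c = 'G'
  · rw [if_pos h19, h19]
    simp [pvAChar, pow_two, hmod, PySem.Chars.islower, PySem.Chars.isupper]
    try ring_nf
  rw [if_neg h19]
  by_cases h20 : c = 'F'
  · rw [if_pos h20, h20]
    simp [pvAChar, pow_two, hmod, PySem.Chars.islower, PySem.Chars.isupper]
    try ring_nf
  rw [if_neg h20]
  by_cases h21 : c = 'E'
  · rw [if_pos h21, h21]
    simp [pvAChar, pow_two, hmod, PySem.Chars.islower, PySem.Chars.isupper]
    try ring_nf
  rw [if_neg h21]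
  by_cases h22 : c = 'D'
  · rw [if_pos h22, h22]
    simp [pvAChar, pow_two, hmod, PySem.Chars.islower, PySem.Chars.isupper]
    try ring_nf
  rw [if_neg h22]
  by_cases h23 : c = 'C'
  · rw [if_pos h23, h23]
    simp [pvAChar, pow_two, hmod, PySem.Chars.islower, PySem.Chars.isupper]
    try ring_nf
  rw [if_neg h23]
  by_cases h24 : c = 'B'
  · rw [if_pos h24, h24]
    simp [pvAChar, pow_two, hmod, PySem.Chars.islower, PySem.Chars.isupper]
    try ring_nf
  rw [if_neg h24]
  by_cases h25 : c = 'A'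
  · rw [if_pos h25, h25]
    simp [pvAChar, pow_two, hmod, PySem.Chars.islower, PySem.Chars.isupper]
    try ring_nf
  rw [if_neg h25]
  by_cases h26 : c = 'z'
  · rw [if_pos h26, h26]
    simp [pvAChar, pow_two, hmod, PySem.Chars.islower, PySem.Chars.isupper]
    try ring_nf
  rw [if_neg h26]
  by_cases h27 : c = 'y'
  · rw [if_pos h27, h27]
    simp [pvAChar, pow_two, hmod, PySem.Chars.islower, PySem.Chars.isupper]
    try ring_nf
  rw [if_neg h27]
  by_cases h28 : c = 'x'
  · rw [if_pos h28, h28]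
    simp [pvAChar, pow_two, hmod, PySem.Chars.islower, PySem.Chars.isupper]
    try ring_nf
  rw [if_neg h28]
  by_cases h29 : c = 'w'
  · rw [if_pos h29, h29]
    simp [pvAChar, pow_two, hmod, PySem.Chars.islower, PySem.Chars.isupper]
    try ring_nf
  rw [if_neg h29]
  by_cases h30 : c = 'v'
  · rw [if_pos h30, h30]
    simp [pvAChar, pow_two, hmod, PySem.Chars.islower, PySem.Chars.isupper]
    try ring_nf
  rw [if_neg h30]
  by_cases h31 : c = 'u'
  · rw [if_pos h31, h31]
    simp [pvAChar, pow_two, hmod, PySem.Chars.islower, PySem.Chars.isupper]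
    try ring_nf
  rw [if_neg h31]
  by_cases h32 : c = 't'
  · rw [if_pos h32, h32]
    simp [pvAChar, pow_two, hmod, PySem.Chars.islower, PySem.Chars.isupper]
    try ring_nf
  rw [if_neg h32]
  by_cases h33 : c = 's'
  · rw [if_pos h33, h33]
    simp [pvAChar, pow_two, hmod, PySem.Chars.islower, PySem.Chars.isupper]
    try ring_nf
  rw [if_neg h33]
  by_cases h34 : c = 'r'
  · rw [if_pos h34, h34]
    simp [pvAChar, pow_two, hmod, PySem.Chars.islower, PySem.Chars.isupper]
    try ring_nf
  rw [if_neg h34]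
  by_cases h35 : c = 'q'
  · rw [if_pos h35, h35]
    simp [pvAChar, pow_two, hmod, PySem.Chars.islower, PySem.Chars.isupper]
    try ring_nf
  rw [if_neg h35]
  by_cases h36 : c = 'p'
  · rw [if_pos h36, h36]
    simp [pvAChar, pow_two, hmod, PySem.Chars.islower, PySem.Chars.isupper]
    try ring_nf
  rw [if_neg h36]
  by_cases h37 : c = 'o'
  · rw [if_pos h37, h37]
    simp [pvAChar, pow_two, hmod, PySem.Chars.islower, PySem.Chars.isupper]
    try ring_nf
  rw [if_neg h37]
  by_cases h38 : c = 'n'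
  · rw [if_pos h38, h38]
    simp [pvAChar, pow_two, hmod, PySem.Chars.islower, PySem.Chars.isupper]
    try ring_nf
  rw [if_neg h38]
  by_cases h39 : c = 'm'
  · rw [if_pos h39, h39]
    simp [pvAChar, pow_two, hmod, PySem.Chars.islower, PySem.Chars.isupper]
    try ring_nf
  rw [if_neg h39]
  by_cases h40 : c = 'l'
  · rw [if_pos h40, h40]
    simp [pvAChar, pow_two, hmod, PySem.Chars.islower, PySem.Chars.isupper]
    try ring_nf
  rw [if_neg h40]
  by_cases h41 : c = 'k'
  · rw [if_pos h41, h41]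
    simp [pvAChar, pow_two, hmod, PySem.Chars.islower, PySem.Chars.isupper]
    try ring_nf
  rw [if_neg h41]
  by_cases h42 : c = 'j'
  · rw [if_pos h42, h42]
    simp [pvAChar, pow_two, hmod, PySem.Chars.islower, PySem.Chars.isupper]
    try ring_nf
  rw [if_neg h42]
  by_cases h43 : c = 'i'
  · rw [if_pos h43, h43]
    simp [pvAChar, pow_two, hmod, PySem.Chars.islower, PySem.Chars.isupper]
    try ring_nf
  rw [if_neg h43]
  by_cases h44 : c = 'h'
  · rw [if_pos h44, h44]
    simp [pvAChar, pow_two, hmod, PySem.Chars.islower, PySem.Chars.isupper]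
    try ring_nf
  rw [if_neg h44]
  by_cases h45 : c = 'g'
  · rw [if_pos h45, h45]
    simp [pvAChar, pow_two, hmod, PySem.Chars.islower, PySem.Chars.isupper]
    try ring_nf
  rw [if_neg h45]
  by_cases h46 : c = 'f'
  · rw [if_pos h46, h46]
    simp [pvAChar, pow_two, hmod, PySem.Chars.islower, PySem.Chars.isupper]
    try ring_nf
  rw [if_neg h46]
  by_cases h47 : c = 'e'
  · rw [if_pos h47, h47]
    simp [pvAChar, pow_two, hmod, PySem.Chars.islower, PySem.Chars.isupper]
    try ring_nf
  rw [if_neg h47]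
  by_cases h48 : c = 'd'
  · rw [if_pos h48, h48]
    simp [pvAChar, pow_two, hmod, PySem.Chars.islower, PySem.Chars.isupper]
    try ring_nf
  rw [if_neg h48]
  by_cases h49 : c = 'c'
  · rw [if_pos h49, h49]
    simp [pvAChar, pow_two, hmod, PySem.Chars.islower, PySem.Chars.isupper]
    try ring_nf
  rw [if_neg h49]
  by_cases h50 : c = 'b'
  · rw [if_pos h50, h50]
    simp [pvAChar, pow_two, hmod, PySem.Chars.islower, PySem.Chars.isupper]
    try ring_nf
  rw [if_neg h50]
  by_cases h51 : c = 'a'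
  · rw [if_pos h51, h51]
    simp [pvAChar, pow_two, hmod, PySem.Chars.islower, PySem.Chars.isupper]
    try ring_nf
  rw [if_neg h51]
  -- c is none of the 52 letters: both sides are c
  have H0 : ¬ c.toNat = 90 := pvNeToNat c 'Z' h0
  have H1 : ¬ c.toNat = 89 := pvNeToNat c 'Y' h1
  have H2 : ¬ c.toNat = 88 := pvNeToNat c 'X' h2
  have H3 : ¬ c.toNat = 87 := pvNeToNat c 'W' h3
  have H4 : ¬ c.toNat = 86 := pvNeToNat c 'V' h4
  have H5 : ¬ c.toNat = 85 := pvNeToNat c 'U' h5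
  have H6 : ¬ c.toNat = 84 := pvNeToNat c 'T' h6
  have H7 : ¬ c.toNat = 83 := pvNeToNat c 'S' h7
  have H8 : ¬ c.toNat = 82 := pvNeToNat c 'R' h8
  have H9 : ¬ c.toNat = 81 := pvNeToNat c 'Q' h9
  have H10 : ¬ c.toNat = 80 := pvNeToNat c 'P' h10
  have H11 : ¬ c.toNat = 79 := pvNeToNat c 'O' h11
  have H12 : ¬ c.toNat = 78 := pvNeToNat c 'N' h12
  have H13 : ¬ c.toNat = 77 := pvNeToNat c 'M' h13
  have H14 : ¬ c.toNat = 76 := pvNeToNat c 'L' h14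
  have H15 : ¬ c.toNat = 75 := pvNeToNat c 'K' h15
  have H16 : ¬ c.toNat = 74 := pvNeToNat c 'J' h16
  have H17 : ¬ c.toNat = 73 := pvNeToNat c 'I' h17
  have H18 : ¬ c.toNat = 72 := pvNeToNat c 'H' h18
  have H19 : ¬ c.toNat = 71 := pvNeToNat c 'G' h19
  have H20 : ¬ c.toNat = 70 := pvNeToNat c 'F' h20
  have H21 : ¬ c.toNat = 69 := pvNeToNat c 'E' h21
  have H22 : ¬ c.toNat = 68 := pvNeToNat c 'D' h22
  have H23 : ¬ c.toNat = 67 := pvNeToNat c 'C' h23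
  have H24 : ¬ c.toNat = 66 := pvNeToNat c 'B' h24
  have H25 : ¬ c.toNat = 65 := pvNeToNat c 'A' h25
  have H26 : ¬ c.toNat = 122 := pvNeToNat c 'z' h26
  have H27 : ¬ c.toNat = 121 := pvNeToNat c 'y' h27
  have H28 : ¬ c.toNat = 120 := pvNeToNat c 'x' h28
  have H29 : ¬ c.toNat = 119 := pvNeToNat c 'w' h29
  have H30 : ¬ c.toNat = 118 := pvNeToNat c 'v' h30
  have H31 : ¬ c.toNat = 117 := pvNeToNat c 'u' h31
  have H32 : ¬ c.toNat = 116 := pvNeToNat c 't' h32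
  have H33 : ¬ c.toNat = 115 := pvNeToNat c 's' h33
  have H34 : ¬ c.toNat = 114 := pvNeToNat c 'r' h34
  have H35 : ¬ c.toNat = 113 := pvNeToNat c 'q' h35
  have H36 : ¬ c.toNat = 112 := pvNeToNat c 'p' h36
  have H37 : ¬ c.toNat = 111 := pvNeToNat c 'o' h37
  have H38 : ¬ c.toNat = 110 := pvNeToNat c 'n' h38
  have H39 : ¬ c.toNat = 109 := pvNeToNat c 'm' h39
  have H40 : ¬ c.toNat = 108 := pvNeToNat c 'l' h40
  have H41 : ¬ c.toNat = 107 := pvNeToNat c 'k' h41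
  have H42 : ¬ c.toNat = 106 := pvNeToNat c 'j' h42
  have H43 : ¬ c.toNat = 105 := pvNeToNat c 'i' h43
  have H44 : ¬ c.toNat = 104 := pvNeToNat c 'h' h44
  have H45 : ¬ c.toNat = 103 := pvNeToNat c 'g' h45
  have H46 : ¬ c.toNat = 102 := pvNeToNat c 'f' h46
  have H47 : ¬ c.toNat = 101 := pvNeToNat c 'e' h47
  have H48 : ¬ c.toNat = 100 := pvNeToNat c 'd' h48
  have H49 : ¬ c.toNat = 99 := pvNeToNat c 'c' h49
  have H50 : ¬ c.toNat = 98 := pvNeToNat c 'b' h50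
  have H51 : ¬ c.toNat = 97 := pvNeToNat c 'a' h51
  simp [pvAChar, PySem.Chars.islower, PySem.Chars.isupper, Char.le_def, UInt32.le_iff_toNat_le]
  split_ifs <;> first | rfl | omega

theorem pvAChar_singleton (c : Char) (n m : Int) : pvAChar c n m = [(pvAChar c n m).headI] := by
  unfold pvAChar
  split_ifs <;> rfl

-- ===== VERDICT (by name: the statement is the Claim_ definition above) =====
theorem encrypt_mytext_spec : Claim_equal_encrypt_mytext := by
  unfold Claim_equal_encrypt_mytext Spec_encrypt_mytext encrypt_mytext encrypt_mytext_alt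
  intro text n m _
  congr 1
  induction text.toList using List.reverseRecOn with
  | nil => rfl
  | append_singleton xs x ih =>
      rw [List.foldl_append, List.map_append, ← ih]
      simp only [List.foldl_cons, List.foldl_nil, List.map]
      rw [pvTable_getD]
      show _ ++ pvAChar x n m = _ ++ [(pvAChar x n m).headI]
      rw [← pvAChar_singleton]
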